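-- pv_equiv track=rewrite | github.com/KindDave/david-awoyemi-academic-site | scripts/build_site.py | parse_education
-- ===== SOURCE A (Python) =====
-- def parse_education(lines: list[str]) -> list[dict[str, str]]:
--     education: list[dict[str, str]] = []
--     for index in range(0, len(lines), 3):
--         chunk = lines[index:index + 3]
--         if len(chunk) == 3:
--             education.append(
--                 {
--                     "degree": chunk[0],
--                     "institution": chunk[1],
--                     "date": chunk[2],
--                 }
--             )
--     return education
-- ===== SOURCE B (Python) =====
-- def parse_education(lines: list[str]) -> list[dict[str, str]]:
--     it = iter(lines)
--     return [
--         {"degree": degree, "institution": institution, "date": date}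
--         for degree, institution, date in zip(it, it, it)
--     ]
-- ===== Notes on version B (the rewrite author's own statement) =====
-- stated objective: idiomatic
-- what changed: Replaces the index-stepping range loop with explicit slicing and a length-3 guard by a single comprehension over zip of a shared iterator taken three at a time; zip's shortest-stop drops the incomplete trailing group implicitly.
import Mathlib
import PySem

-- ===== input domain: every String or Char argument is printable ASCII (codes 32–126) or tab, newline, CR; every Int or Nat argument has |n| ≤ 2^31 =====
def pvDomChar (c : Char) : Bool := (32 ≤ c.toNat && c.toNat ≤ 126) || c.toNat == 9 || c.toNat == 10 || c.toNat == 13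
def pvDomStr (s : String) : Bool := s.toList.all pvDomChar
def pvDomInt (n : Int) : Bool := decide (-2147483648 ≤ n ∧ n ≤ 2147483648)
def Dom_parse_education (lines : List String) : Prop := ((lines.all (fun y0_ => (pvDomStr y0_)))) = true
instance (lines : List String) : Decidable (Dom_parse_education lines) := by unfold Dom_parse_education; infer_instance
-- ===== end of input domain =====

-- B replaces A's index-stepping range loop with slices and a length-3 guard by one
-- comprehension over zip of a shared iterator consumed three at a time (idiomatic; same O(n) cost).

-- ===== PORT A =====
-- literal port of A: for index in range(0, len(lines), 3): chunk = lines[index:index+3];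
-- if len(chunk) == 3: append {...}.  chunk[k] is ported as pyGetD chunk k "" — the guard
-- len(chunk) == 3 ensures the index is in range, so the default is never used.
def parse_education (lines : List String) : List (List (String × String)) :=
  (PySem.List.pyRange 0 (PySem.List.len lines) 3).foldl
    (fun education index =>
      let chunk := PySem.List.slice lines (some index) (some (index + 3))
      if chunk.length == 3 then
        education ++ [[("degree", PySem.List.pyGetD chunk 0 ""),
                       ("institution", PySem.List.pyGetD chunk 1 ""),
                       ("date", PySem.List.pyGetD chunk 2 "")]]
      else education) []

-- ===== PORT B =====
-- literal port of B: zip(it, it, it) over a shared iterator draws three elements per step and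
-- stops when fewer than three remain — i.e. structural recursion taking three at a time.
def parse_education_alt : List String → List (List (String × String))
  | degree :: institution :: date :: rest =>
      [("degree", degree), ("institution", institution), ("date", date)]
        :: parse_education_alt rest
  | _ => []

-- ===== PRECONDITION & SPEC =====
def Spec_parse_education (lines : List String) (out : List (List (String × String))) : Prop := out = parse_education_alt lines
instance (lines : List String) (out : List (List (String × String))) : Decidable (Spec_parse_education lines out) := by unfold Spec_parse_education; infer_instance

-- ===== CLAIM (what is proved, stated in full; the proofs are below) =====
def Claim_equal_parse_education : Prop := ∀ (lines : List String), Dom_parse_education lines → Spec_parse_education lines (parse_education lines)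

-- ===== LEMMAS AND PROOFS =====

-- range(0, n, 3) for n ≥ 3 starts at 0 and the remaining indices are range(0, n-3, 3) shifted by 3
theorem pvRange3_cons (n : Int) (h : 3 ≤ n) :
    PySem.List.pyRange 0 n 3 = 0 :: (PySem.List.pyRange 0 (n - 3) 3).map (· + 3) := by
  rw [PySem.List.pyRange_of_pos 0 n (by norm_num),
      PySem.List.pyRange_of_pos 0 (n - 3) (by norm_num)]
  have h1 : (0 : Int) < n := by omega
  have h2 : ((n - 0 + 3 - 1) / 3).toNat = ((n - 3 - 0 + 3 - 1) / 3).toNat + 1 := by omega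
  rw [if_pos h1, h2]
  by_cases h3 : (0 : Int) < n - 3
  · rw [if_pos h3, List.range_succ_eq_map, List.map_cons, List.map_map, List.map_map]
    refine congrArg₂ _ (by norm_num) (List.map_congr_left ?_)
    intro k _
    simp only [Function.comp_apply]
    push_cast
    ring
  · rw [if_neg h3]
    have : ((n - 3 - 0 + 3 - 1) / 3).toNat = 0 := by omega
    rw [this]
    norm_num

-- the fold of A's step over range(0, len(lines), 3) appends exactly B's groups of three
theorem pvFoldA (lines : List String) (acc : List (List (String × String))) :
    (PySem.List.pyRange 0 (PySem.List.len lines) 3).foldl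
      (fun education index =>
        let chunk := PySem.List.slice lines (some index) (some (index + 3))
        if chunk.length == 3 then
          education ++ [[("degree", PySem.List.pyGetD chunk 0 ""),
                         ("institution", PySem.List.pyGetD chunk 1 ""),
                         ("date", PySem.List.pyGetD chunk 2 "")]]
        else education) acc
    = acc ++ parse_education_alt lines := by
  induction lines using parse_education_alt.induct generalizing acc with
  | case1 a b c rest ih =>
      have hlen : PySem.List.len (a :: b :: c :: rest) = (rest.length : Int) + 3 := by
        simp [PySem.List.len]; ring
      rw [hlen, pvRange3_cons _ (by omega), List.foldl_cons, List.foldl_map]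
      have hstep : ∀ (e : List (List (String × String))) (i : Int),
          i ∈ PySem.List.pyRange 0 ((rest.length : Int) + 3 - 3) 3 →
          (fun education index =>
            let chunk := PySem.List.slice (a :: b :: c :: rest) (some index) (some (index + 3))
            if chunk.length == 3 then
              education ++ [[("degree", PySem.List.pyGetD chunk 0 ""),
                             ("institution", PySem.List.pyGetD chunk 1 ""),
                             ("date", PySem.List.pyGetD chunk 2 "")]]
            else education) e (i + 3)
          = (fun education index =>
            let chunk := PySem.List.slice rest (some index) (some (index + 3))
            if chunk.length == 3 then
              education ++ [[("degree", PySem.List.pyGetD chunk 0 ""),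
                             ("institution", PySem.List.pyGetD chunk 1 ""),
                             ("date", PySem.List.pyGetD chunk 2 "")]]
            else education) e i := by
        intro e i hi
        have h0i : 0 ≤ i := ((PySem.List.mem_pyRange_iff_of_pos (by norm_num) i).mp hi).1
        have hsl : PySem.List.slice (a :: b :: c :: rest) (some (i + 3)) (some (i + 3 + 3))
            = PySem.List.slice rest (some i) (some (i + 3)) := by
          rw [PySem.List.slice_toNat _ (by omega) (by omega),
              PySem.List.slice_toNat _ (by omega) (by omega)]
          have e1 : (i + 3).toNat = i.toNat + 3 := by omega
          have e2 : (i + 3 + 3).toNat = i.toNat + 6 := by omega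
          rw [e1, e2]
          simp [List.drop_succ_cons]
        simp only [hsl]
      rw [PySem.List.foldl_congr_mem _ _ _ _ hstep]
      have hchunk : PySem.List.slice (a :: b :: c :: rest) (some 0) (some (0 + 3)) = [a, b, c] := by
        rw [PySem.List.slice_toNat _ (by norm_num) (by norm_num)]
        simp
      simp only [hchunk]
      have g0 : PySem.List.pyGetD [a, b, c] (0 : Int) "" = a := rfl
      have g1 : PySem.List.pyGetD [a, b, c] (1 : Int) "" = b := rfl
      have g2 : PySem.List.pyGetD [a, b, c] (2 : Int) "" = c := rfl
      simp only [g0, g1, g2]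
      have hcond : (([a, b, c] : List String).length == 3) = true := by simp
      rw [if_pos hcond]
      rw [show ((rest.length : Int) + 3 - 3) = PySem.List.len rest by simp [PySem.List.len]]
      rw [ih]
      simp [parse_education_alt]
  | case2 lines hne =>
      -- fewer than three lines: no complete chunk, A appends nothing and B yields []
      rcases lines with _ | ⟨a, _ | ⟨b, _ | ⟨c, rest⟩⟩⟩
      · simp [parse_education_alt, PySem.List.len,
              PySem.List.pyRange_of_pos 0 0 (by norm_num : (0:Int) < 3)]
      · have hr : PySem.List.pyRange 0 (PySem.List.len [a]) 3 = [0] := by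
          rw [show PySem.List.len [a] = (1 : Int) by simp [PySem.List.len],
              PySem.List.pyRange_of_pos 0 1 (by norm_num)]
          norm_num
        rw [hr, List.foldl_cons, List.foldl_nil]
        have hc : PySem.List.slice [a] (some 0) (some (0 + 3)) = [a] := by
          rw [PySem.List.slice_toNat _ (by norm_num) (by norm_num)]; simp
        rw [hc]
        simp [parse_education_alt]
      · have hr : PySem.List.pyRange 0 (PySem.List.len [a, b]) 3 = [0] := by
          rw [show PySem.List.len [a, b] = (2 : Int) by simp [PySem.List.len],
              PySem.List.pyRange_of_pos 0 2 (by norm_num)]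
          norm_num
        rw [hr, List.foldl_cons, List.foldl_nil]
        have hc : PySem.List.slice [a, b] (some 0) (some (0 + 3)) = [a, b] := by
          rw [PySem.List.slice_toNat _ (by norm_num) (by norm_num)]; simp
        rw [hc]
        simp [parse_education_alt]
      · exact (hne a b c rest rfl).elim

-- ===== VERDICT (by name: the statement is the Claim_ definition above) =====
theorem parse_education_spec : Claim_equal_parse_education := by
  intro lines _
  unfold Spec_parse_education parse_education
  rw [pvFoldA]
  simp
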